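-- pv_equiv track=rewrite | github.com/Lucy-Bernard/leafline | api/service/impl/diagnosis_service_impl.py | _fix_common_syntax_errors
-- ===== SOURCE A (Python) =====
-- def _fix_common_syntax_errors(code: str) -> str:
--     """
--     Fix common syntax errors in AI-generated Python code.
--
--     AI models sometimes generate syntactically invalid Python, particularly:
--     - if/elif/else blocks with only comments (no executable statements)
--
--     Python requires at least one statement in each block. If the AI writes:
--         if condition:
--             # comment
--         else:
--             ...
--
--     This is invalid because the if block has no statement. We fix it by adding 'pass'.
--
--     Args:
--         code: AI-generated Python code string
--
--     Returns:
--         str: Fixed code with 'pass' statements added where needed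
--     """
--     lines = code.split("\n")
--     fixed_lines = []
--     i = 0
--
--     while i < len(lines):
--         line = lines[i]
--         fixed_lines.append(line)
--
--         stripped = line.strip()
--         if (
--             stripped
--             and (
--                 stripped.startswith("if ")
--                 or stripped.startswith("elif ")
--                 or stripped == "else:"
--             )
--             and stripped.endswith(":")
--         ):
--             if i + 1 < len(lines):
--                 next_line = lines[i + 1]
--                 next_stripped = next_line.strip()
--
--                 if next_stripped.startswith("#"):
--                     if i + 2 < len(lines):
--                         line_after_comment = lines[i + 2]
--                         current_indent = len(next_line) - len(next_line.lstrip())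
--                         after_indent = len(line_after_comment) - len(
--                             line_after_comment.lstrip(),
--                         )
--
--                         if (
--                             after_indent <= current_indent
--                             and line_after_comment.strip()
--                         ):
--                             fixed_lines.append(next_line)
--                             fixed_lines.append(" " * current_indent + "pass")
--                             i += 1
--                     else:
--                         fixed_lines.append(next_line)
--                         current_indent = len(next_line) - len(next_line.lstrip())
--                         fixed_lines.append(" " * current_indent + "pass")
--                         i += 1
--
--         i += 1
--
--     return "\n".join(fixed_lines)
-- ===== SOURCE B (Python) =====
-- def _fix_common_syntax_errors(code: str) -> str:
--     """Single forward pass: a look-behind state machine instead of lookahead with index skipping."""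
--     out = []
--     prev_was_header = False
--     pending_indent = None  # indent of a comment that directly follows an if/elif/else header
--
--     for line in code.split("\n"):
--         stripped = line.strip()
--         if pending_indent is not None:
--             if stripped and len(line) - len(line.lstrip()) <= pending_indent:
--                 out.append(" " * pending_indent + "pass")
--             new_pending = None
--         elif prev_was_header and stripped.startswith("#"):
--             new_pending = len(line) - len(line.lstrip())
--         else:
--             new_pending = None
--         out.append(line)
--         prev_was_header = bool(
--             stripped
--             and (
--                 stripped.startswith("if ")
--                 or stripped.startswith("elif ")
--                 or stripped == "else:"
--             )
--             and stripped.endswith(":")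
--         )
--         pending_indent = new_pending
--
--     if pending_indent is not None:
--         out.append(" " * pending_indent + "pass")
--     return "\n".join(out)
-- ===== Notes on version B (the rewrite author's own statement) =====
-- stated objective: simpler
-- what changed: Replaces A's indexed while loop with two-line lookahead and an i+=1 skip by a single forward for-loop over the lines that keeps look-behind state (a prev-was-header flag and a pending comment indent), deciding each insertion when the following line arrives, with a final flush after the loop.
import Mathlib
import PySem

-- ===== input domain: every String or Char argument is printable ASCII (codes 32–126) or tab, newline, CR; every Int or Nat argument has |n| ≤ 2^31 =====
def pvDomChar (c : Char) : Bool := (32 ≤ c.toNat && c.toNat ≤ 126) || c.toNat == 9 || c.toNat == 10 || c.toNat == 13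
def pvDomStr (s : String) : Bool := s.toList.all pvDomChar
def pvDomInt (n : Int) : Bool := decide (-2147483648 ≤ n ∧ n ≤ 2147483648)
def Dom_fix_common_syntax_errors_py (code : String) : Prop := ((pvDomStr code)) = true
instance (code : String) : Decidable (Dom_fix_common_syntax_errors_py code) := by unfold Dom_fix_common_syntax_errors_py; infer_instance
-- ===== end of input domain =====

-- B replaces A's lookahead-two-lines-plus-index-skip while loop by a single forward pass
-- with look-behind state (a 'header just seen' flag and a pending comment indent); objective: simpler.

-- shared helpers (subexpressions both Pythons contain verbatim)
-- Python truthiness of `stripped` plus the if/elif/else header test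
def pvHeader (stripped : String) : Bool :=
  (!(stripped == "")) &&
    (PySem.Str.startswith stripped "if " || PySem.Str.startswith stripped "elif " ||
      stripped == "else:") &&
  PySem.Str.endswith stripped ":"

-- len(line) - len(line.lstrip())  (a nonnegative int in Python)
def pvIndent (s : String) : Nat := (PySem.Str.len s - PySem.Str.len (PySem.Str.lstrip s)).toNat

-- " " * ci + "pass"
def pvPass (ci : Nat) : String := String.ofList (List.replicate ci ' ' ++ "pass".toList)

-- code.split("\n")  ("\n" ≠ "", so split? never returns none)
def pvLines (code : String) : List String := (PySem.Str.split? code "\n").getD []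

-- ===== PORT A =====
-- A's while loop over index i, written as recursion on the suffix lines[i:];
-- lines[i], lines[i+1], lines[i+2] are the first three elements, the `i += 1` skip = recursing on rest2.
def pvLoopA : List String → List String
  | [] => []
  | line :: rest =>
    if pvHeader (PySem.Str.strip line) then
      match rest with
      | [] => [line]                                   -- i + 1 < len fails: only `line` appended
      | next :: rest2 =>
        if PySem.Str.startswith (PySem.Str.strip next) "#" then
          match rest2 with
          | [] => [line, next, pvPass (pvIndent next)] -- i + 2 < len fails: append next, pass, stop
          | after :: tail =>
            if decide (pvIndent after ≤ pvIndent next) && !(PySem.Str.strip after == "") then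
              line :: next :: pvPass (pvIndent next) :: pvLoopA (after :: tail)
            else
              line :: pvLoopA (next :: after :: tail)
        else line :: pvLoopA (next :: rest2)
    else line :: pvLoopA rest

def fix_common_syntax_errors_py (code : String) : String :=
  PySem.Str.join "\n" (pvLoopA (pvLines code))

-- ===== PORT B =====
-- B's single pass: ph = prev_was_header, pend = pending_indent
def pvLoopB (ph : Bool) (pend : Option Nat) : List String → List String
  | [] =>
    match pend with                                    -- after the loop: trailing pass if pending
    | some ci => [pvPass ci]
    | none => []
  | line :: rest =>
    let stripped := PySem.Str.strip line
    match pend with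
    | some ci =>
      (if !(stripped == "") && decide (pvIndent line ≤ ci) then [pvPass ci] else []) ++
        line :: pvLoopB (pvHeader stripped) none rest
    | none =>
      line ::
        pvLoopB (pvHeader stripped)
          (if ph && PySem.Str.startswith stripped "#" then some (pvIndent line) else none) rest

def fix_common_syntax_errors_py_alt (code : String) : String :=
  PySem.Str.join "\n" (pvLoopB false none (pvLines code))

-- ===== PRECONDITION & SPEC =====
def Spec_fix_common_syntax_errors_py (code : String) (out : String) : Prop := out = fix_common_syntax_errors_py_alt code
instance (code : String) (out : String) : Decidable (Spec_fix_common_syntax_errors_py code out) := by unfold Spec_fix_common_syntax_errors_py; infer_instance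

-- ===== CLAIM (what is proved, stated in full; the proofs are below) =====
def Claim_equal_fix_common_syntax_errors_py : Prop := ∀ (code : String), Dom_fix_common_syntax_errors_py code → Spec_fix_common_syntax_errors_py code (fix_common_syntax_errors_py code)

-- ===== LEMMAS AND PROOFS =====

-- what A appends after a header line, as a function of the remaining lines
def pvG (ci : Nat) : List String → List String
  | [] => [pvPass ci]
  | after :: rest =>
    if decide (pvIndent after ≤ ci) && !(PySem.Str.strip after == "") then
      pvPass ci :: pvLoopA (after :: rest)
    else pvLoopA (after :: rest)

def pvF : List String → List String
  | [] => []
  | next :: rest2 =>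
    if PySem.Str.startswith (PySem.Str.strip next) "#" then
      next :: pvG (pvIndent next) rest2
    else pvLoopA (next :: rest2)

lemma comment_not_header (s : String) (h : PySem.Chars.startswith s.toList ['#'] = true) :
    pvHeader s = false := by
  obtain ⟨t, ht⟩ := (PySem.Chars.startswith_iff _ _).mp h
  have hs : s.toList = '#' :: t := by simpa using ht.symm
  have hif : PySem.Chars.startswith s.toList ['i', 'f', ' '] = false := by
    rw [← Bool.not_eq_true]
    intro hc
    obtain ⟨u, hu⟩ := (PySem.Chars.startswith_iff _ _).mp hc
    rw [hs] at hu; simp at hu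
  have helif : PySem.Chars.startswith s.toList ['e', 'l', 'i', 'f', ' '] = false := by
    rw [← Bool.not_eq_true]
    intro hc
    obtain ⟨u, hu⟩ := (PySem.Chars.startswith_iff _ _).mp hc
    rw [hs] at hu; simp at hu
  have helse : (s == "else:") = false := by
    rw [← Bool.not_eq_true]
    intro hc
    have : s = "else:" := by simpa using hc
    rw [this] at hs; simp at hs
  simp [pvHeader, hif, helif, helse]

lemma loopA_cons_nothdr (line : String) (l : List String)
    (h : pvHeader (PySem.Str.strip line) = false) :
    pvLoopA (line :: l) = line :: pvLoopA l := by
  conv_lhs => rw [pvLoopA.eq_def]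
  simp [h]

lemma loopA_cons (line : String) (l : List String) :
    pvLoopA (line :: l) =
      line :: (if pvHeader (PySem.Str.strip line) then pvF l else pvLoopA l) := by
  by_cases h : pvHeader (PySem.Str.strip line) = true
  · cases l with
    | nil =>
      conv_lhs => rw [pvLoopA.eq_def]
      simp [pvF, h]
    | cons next rest2 =>
      by_cases hc : PySem.Chars.startswith (PySem.Chars.strip next.toList) ['#'] = true
      · cases rest2 with
        | nil =>
          conv_lhs => rw [pvLoopA.eq_def]
          simp [pvF, pvG, h, hc]
        | cons after tail =>
          have hnh : pvHeader (PySem.Str.strip next) = false :=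
            comment_not_header _ (by simpa using hc)
          by_cases hcond :
              (decide (pvIndent after ≤ pvIndent next) &&
                !(PySem.Str.strip after == "")) = true
          · conv_lhs => rw [pvLoopA.eq_def]
            simp [pvF, pvG, h, hc, hcond]
          · simp only [Bool.not_eq_true] at hcond
            conv_lhs => rw [pvLoopA.eq_def]
            simp [pvF, pvG, h, hc, hcond,
              loopA_cons_nothdr next (after :: tail) hnh]
      · have hc' : PySem.Chars.startswith (PySem.Chars.strip next.toList) ['#'] = false := by
          simpa using hc
        conv_lhs => rw [pvLoopA.eq_def]
        simp [pvF, h, hc']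
  · have h' : pvHeader (PySem.Str.strip line) = false := by simpa using h
    simp [loopA_cons_nothdr line l h', h']

lemma pvMain : ∀ n (l : List String), l.length ≤ n →
    (pvLoopB false none l = pvLoopA l) ∧
    (pvLoopB true none l = pvF l) ∧
    (∀ ci, pvLoopB false (some ci) l = pvG ci l) := by
  intro n
  induction n with
  | zero =>
    intro l hl
    have hnil : l = [] := List.eq_nil_of_length_eq_zero (Nat.le_zero.mp hl)
    subst hnil
    exact ⟨by rw [pvLoopA.eq_def]; simp [pvLoopB], by simp [pvLoopB, pvF],
      fun ci => by simp [pvLoopB, pvG]⟩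
  | succ n ih =>
    intro l hl
    cases l with
    | nil =>
      exact ⟨by rw [pvLoopA.eq_def]; simp [pvLoopB], by simp [pvLoopB, pvF],
        fun ci => by simp [pvLoopB, pvG]⟩
    | cons x xs =>
      have hxs : xs.length ≤ n := by simpa using Nat.lt_succ_iff.mp (by simpa using hl)
      obtain ⟨ihP, ihQ, ihG⟩ := ih xs hxs
      refine ⟨?_, ?_, ?_⟩
      · -- pend = none, ph = false
        by_cases hH : pvHeader (PySem.Str.strip x) = true
        · simp [pvLoopB, hH, ihQ, loopA_cons x xs]
        · have hH' : pvHeader (PySem.Str.strip x) = false := by simpa using hH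
          simp [pvLoopB, hH', ihP, loopA_cons x xs]
      · -- pend = none, ph = true
        by_cases hc : PySem.Chars.startswith (PySem.Chars.strip x.toList) ['#'] = true
        · have hnh : pvHeader (PySem.Str.strip x) = false :=
            comment_not_header _ (by simpa using hc)
          simp [pvLoopB, pvF, hc, hnh, ihG]
        · have hc' : PySem.Chars.startswith (PySem.Chars.strip x.toList) ['#'] = false := by
            simpa using hc
          by_cases hH : pvHeader (PySem.Str.strip x) = true
          · simp [pvLoopB, pvF, hc', hH, ihQ, loopA_cons x xs]
          · have hH' : pvHeader (PySem.Str.strip x) = false := by simpa using hH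
            simp [pvLoopB, pvF, hc', hH', ihP, loopA_cons x xs]
      · -- pend = some ci
        intro ci
        by_cases hH : pvHeader (PySem.Str.strip x) = true
        · simp [pvLoopB, pvG, hH, ihQ, loopA_cons x xs, Bool.and_comm]
          split_ifs <;> simp_all
        · have hH' : pvHeader (PySem.Str.strip x) = false := by simpa using hH
          simp [pvLoopB, pvG, hH', ihP, loopA_cons x xs, Bool.and_comm]
          split_ifs <;> simp_all

-- ===== VERDICT (by name: the statement is the Claim_ definition above) =====
theorem fix_common_syntax_errors_py_spec : Claim_equal_fix_common_syntax_errors_py := by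
  intro code _
  unfold Spec_fix_common_syntax_errors_py fix_common_syntax_errors_py fix_common_syntax_errors_py_alt
  rw [(pvMain (pvLines code).length _ le_rfl).1]
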